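-- pv_equiv track=rewrite | github.com/fourth04/digholes | digholes/component/awvs10.py | sortresultlist
-- ===== SOURCE A (Python) =====
-- def sortresultlist(List):
--     Result = []
--     for i in List:
--         if i.startswith('High'):
--             Result.append(i)
--     for i in List:
--         if i.startswith('Medium'):
--             Result.append(i)
--     for i in List:
--         if i.startswith('Low'):
--             Result.append(i)
--     for i in List:
--         if i.startswith('Info'):
--             Result.append(i)
--     for i in List:
--         if i.startswith('Other'):
--             Result.append(i)
--     return Result
-- ===== SOURCE B (Python) =====
-- def sortresultlist(List):
--     high, medium, low, info, other = [], [], [], [], []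
--     for i in List:
--         if i.startswith('High'):
--             high.append(i)
--         elif i.startswith('Medium'):
--             medium.append(i)
--         elif i.startswith('Low'):
--             low.append(i)
--         elif i.startswith('Info'):
--             info.append(i)
--         elif i.startswith('Other'):
--             other.append(i)
--     return high + medium + low + info + other
-- ===== Notes on version B (the rewrite author's own statement) =====
-- stated objective: simpler
-- what changed: Replaces five separate filtering passes over the input with a single pass that distributes each item into one of five severity buckets, concatenated at the end.
import Mathlib
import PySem

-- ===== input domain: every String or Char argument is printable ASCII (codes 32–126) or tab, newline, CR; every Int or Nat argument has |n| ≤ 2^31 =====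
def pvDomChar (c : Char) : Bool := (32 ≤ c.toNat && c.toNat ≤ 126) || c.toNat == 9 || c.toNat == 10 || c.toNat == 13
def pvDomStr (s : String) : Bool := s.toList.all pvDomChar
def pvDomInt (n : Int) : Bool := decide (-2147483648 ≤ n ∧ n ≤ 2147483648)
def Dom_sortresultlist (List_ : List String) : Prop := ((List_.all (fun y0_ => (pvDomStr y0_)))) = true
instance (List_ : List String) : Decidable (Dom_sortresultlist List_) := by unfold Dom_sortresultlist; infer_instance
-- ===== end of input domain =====

-- B replaces A's five filtering passes by one bucketing pass; objective: simpler (one traversal).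

-- ===== PORT A =====
def sortresultlist (List_ : List String) : List String :=
  let r := List_.foldl (fun acc i => if PySem.Str.startswith i "High" then acc ++ [i] else acc) []
  let r := List_.foldl (fun acc i => if PySem.Str.startswith i "Medium" then acc ++ [i] else acc) r
  let r := List_.foldl (fun acc i => if PySem.Str.startswith i "Low" then acc ++ [i] else acc) r
  let r := List_.foldl (fun acc i => if PySem.Str.startswith i "Info" then acc ++ [i] else acc) r
  let r := List_.foldl (fun acc i => if PySem.Str.startswith i "Other" then acc ++ [i] else acc) r
  r

-- ===== PORT B =====
def pvBucketStep (s : List String × List String × List String × List String × List String)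
    (i : String) : List String × List String × List String × List String × List String :=
  if PySem.Str.startswith i "High" then (s.1 ++ [i], s.2.1, s.2.2.1, s.2.2.2.1, s.2.2.2.2)
  else if PySem.Str.startswith i "Medium" then (s.1, s.2.1 ++ [i], s.2.2.1, s.2.2.2.1, s.2.2.2.2)
  else if PySem.Str.startswith i "Low" then (s.1, s.2.1, s.2.2.1 ++ [i], s.2.2.2.1, s.2.2.2.2)
  else if PySem.Str.startswith i "Info" then (s.1, s.2.1, s.2.2.1, s.2.2.2.1 ++ [i], s.2.2.2.2)
  else if PySem.Str.startswith i "Other" then (s.1, s.2.1, s.2.2.1, s.2.2.2.1, s.2.2.2.2 ++ [i])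
  else s

def sortresultlist_alt (List_ : List String) : List String :=
  let b := List_.foldl pvBucketStep ([], [], [], [], [])
  b.1 ++ b.2.1 ++ b.2.2.1 ++ b.2.2.2.1 ++ b.2.2.2.2

-- ===== PRECONDITION & SPEC =====
def Spec_sortresultlist (List_ : List String) (out : List String) : Prop := out = sortresultlist_alt List_
instance (List_ : List String) (out : List String) : Decidable (Spec_sortresultlist List_ out) := by unfold Spec_sortresultlist; infer_instance

-- ===== CLAIM (what is proved, stated in full; the proofs are below) =====
def Claim_equal_sortresultlist : Prop := ∀ (List_ : List String), Dom_sortresultlist List_ → Spec_sortresultlist List_ (sortresultlist List_)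

-- ===== LEMMAS AND PROOFS =====

-- Two prefixes starting with different characters cannot both be prefixes of s.
theorem pv_sw_disj (s : List Char) (a b : Char) (p q : List Char) (hab : a ≠ b)
    (h : PySem.Chars.startswith s (a :: p) = true) :
    PySem.Chars.startswith s (b :: q) = false := by
  rw [PySem.Chars.startswith_iff] at h
  by_contra hc
  rw [Bool.not_eq_false, PySem.Chars.startswith_iff] at hc
  obtain ⟨t, ht⟩ := h
  obtain ⟨u, hu⟩ := hc
  rw [← ht] at hu
  simp only [List.cons_append, List.cons.injEq] at hu
  exact hab hu.1.symm

theorem pv_bucket_inv (L : List String) (h m lo inf o : List String) :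
    L.foldl pvBucketStep (h, m, lo, inf, o) =
      (h ++ L.filter (fun i => PySem.Str.startswith i "High"),
       m ++ L.filter (fun i => PySem.Str.startswith i "Medium"),
       lo ++ L.filter (fun i => PySem.Str.startswith i "Low"),
       inf ++ L.filter (fun i => PySem.Str.startswith i "Info"),
       o ++ L.filter (fun i => PySem.Str.startswith i "Other")) := by
  induction L generalizing h m lo inf o with
  | nil => simp
  | cons x xs ih =>
    have eH : PySem.Str.startswith x "High" = PySem.Chars.startswith x.toList ['H','i','g','h'] := by
      simp
    have eM : PySem.Str.startswith x "Medium" = PySem.Chars.startswith x.toList ['M','e','d','i','u','m'] := by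
      simp
    have eL : PySem.Str.startswith x "Low" = PySem.Chars.startswith x.toList ['L','o','w'] := by
      simp
    have eI : PySem.Str.startswith x "Info" = PySem.Chars.startswith x.toList ['I','n','f','o'] := by
      simp
    have eO : PySem.Str.startswith x "Other" = PySem.Chars.startswith x.toList ['O','t','h','e','r'] := by
      simp
    simp only [List.foldl_cons, List.filter_cons]
    by_cases hH : PySem.Chars.startswith x.toList ['H','i','g','h'] = true
    · have hM := pv_sw_disj x.toList 'H' 'M' ['i','g','h'] ['e','d','i','u','m'] (by decide) hH
      have hL := pv_sw_disj x.toList 'H' 'L' ['i','g','h'] ['o','w'] (by decide) hH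
      have hI := pv_sw_disj x.toList 'H' 'I' ['i','g','h'] ['n','f','o'] (by decide) hH
      have hO := pv_sw_disj x.toList 'H' 'O' ['i','g','h'] ['t','h','e','r'] (by decide) hH
      simp [pvBucketStep, eH, eM, eL, eI, eO, hH, hM, hL, hI, hO, ih]
    · by_cases hM : PySem.Chars.startswith x.toList ['M','e','d','i','u','m'] = true
      · have hL := pv_sw_disj x.toList 'M' 'L' ['e','d','i','u','m'] ['o','w'] (by decide) hM
        have hI := pv_sw_disj x.toList 'M' 'I' ['e','d','i','u','m'] ['n','f','o'] (by decide) hM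
        have hO := pv_sw_disj x.toList 'M' 'O' ['e','d','i','u','m'] ['t','h','e','r'] (by decide) hM
        simp [pvBucketStep, eH, eM, eL, eI, eO, hH, hM, hL, hI, hO, ih]
      · by_cases hL : PySem.Chars.startswith x.toList ['L','o','w'] = true
        · have hI := pv_sw_disj x.toList 'L' 'I' ['o','w'] ['n','f','o'] (by decide) hL
          have hO := pv_sw_disj x.toList 'L' 'O' ['o','w'] ['t','h','e','r'] (by decide) hL
          simp [pvBucketStep, eH, eM, eL, eI, eO, hH, hM, hL, hI, hO, ih]
        · by_cases hI : PySem.Chars.startswith x.toList ['I','n','f','o'] = true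
          · have hO := pv_sw_disj x.toList 'I' 'O' ['n','f','o'] ['t','h','e','r'] (by decide) hI
            simp [pvBucketStep, eH, eM, eL, eI, eO, hH, hM, hL, hI, hO, ih]
          · by_cases hO : PySem.Chars.startswith x.toList ['O','t','h','e','r'] = true
            · simp [pvBucketStep, eH, eM, eL, eI, eO, hH, hM, hL, hI, hO, ih]
            · simp [pvBucketStep, eH, eM, eL, eI, eO, hH, hM, hL, hI, hO, ih]

-- ===== VERDICT (by name: the statement is the Claim_ definition above) =====
theorem sortresultlist_spec : Claim_equal_sortresultlist := by
  intro L _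
  unfold Spec_sortresultlist sortresultlist sortresultlist_alt
  simp only [PySem.List.foldl_append_if_eq_filter, pv_bucket_inv, List.nil_append,
    List.append_assoc]
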